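-- pv_equiv track=rewrite | github.com/Mithilesh3/product-test | backend/app/modules/reports/html_engine/engine.py | _metric_extremes
-- ===== SOURCE A (Python) =====
-- from typing import Any, Dict, List, Sequence
--
-- def _safe_int(value: Any, default: int = 0) -> int:
--     try:
--         return int(value)
--     except (TypeError, ValueError):
--         return default
--
-- def _metric_extremes(metrics: Dict[str, Any]) -> tuple[str, str]:
--     metric_map = {
--         "जीवन स्थिरता": _safe_int(metrics.get("life_stability_index"), 0),
--         "निर्णय स्पष्टता": _safe_int(metrics.get("confidence_score"), 0),
--         "धर्म संरेखण": _safe_int(metrics.get("dharma_alignment_score"), 0),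
--         "भावनात्मक संतुलन": _safe_int(metrics.get("emotional_regulation_index"), 0),
--         "वित्त अनुशासन": _safe_int(metrics.get("financial_discipline_index"), 0),
--         "कर्म दबाव": _safe_int(metrics.get("karma_pressure_index"), 0),
--     }
--     filtered = {k: v for k, v in metric_map.items() if v > 0}
--     if not filtered:
--         return "जीवन स्थिरता", "कर्म दबाव"
--     strongest = max(filtered, key=filtered.get)
--     weakest = min(filtered, key=filtered.get)
--     return strongest, weakest
-- ===== SOURCE B (Python) =====
-- def _safe_int(value, default=0):
--     try:
--         return int(value)
--     except (TypeError, ValueError):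
--         return default
--
-- _PAIRS = [
--     ("जीवन स्थिरता", "life_stability_index"),
--     ("निर्णय स्पष्टता", "confidence_score"),
--     ("धर्म संरेखण", "dharma_alignment_score"),
--     ("भावनात्मक संतुलन", "emotional_regulation_index"),
--     ("वित्त अनुशासन", "financial_discipline_index"),
--     ("कर्म दबाव", "karma_pressure_index"),
-- ]
--
-- def _metric_extremes(metrics):
--     best = None   # (name, value) with strictly greatest positive value, first wins
--     worst = None  # (name, value) with strictly smallest positive value, first wins
--     for name, key in _PAIRS:
--         v = _safe_int(metrics.get(key), 0)
--         if v <= 0: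
--             continue
--         if best is None or v > best[1]:
--             best = (name, v)
--         if worst is None or v < worst[1]:
--             worst = (name, v)
--     if best is None:
--         return "जीवन स्थिरता", "कर्म दबाव"
--     return best[0], worst[0]
-- ===== Notes on version B (the rewrite author's own statement) =====
-- stated objective: alternative
-- what changed: Replaces the dict build + dict-comprehension filter + two separate max/min key scans with a single loop over the six (name,key) pairs that maintains the strongest and weakest positive metric in one pass.
import Mathlib
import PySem

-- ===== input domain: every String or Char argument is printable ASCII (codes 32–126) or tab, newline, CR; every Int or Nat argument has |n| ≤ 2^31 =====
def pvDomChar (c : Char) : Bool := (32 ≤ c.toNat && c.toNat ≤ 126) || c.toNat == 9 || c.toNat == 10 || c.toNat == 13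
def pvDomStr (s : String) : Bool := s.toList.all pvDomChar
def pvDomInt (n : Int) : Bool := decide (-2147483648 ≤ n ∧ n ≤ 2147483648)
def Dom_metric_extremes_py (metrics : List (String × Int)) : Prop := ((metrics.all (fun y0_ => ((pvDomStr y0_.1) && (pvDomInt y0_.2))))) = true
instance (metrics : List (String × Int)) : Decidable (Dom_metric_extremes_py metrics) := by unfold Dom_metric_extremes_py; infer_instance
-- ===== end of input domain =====

-- B merges A's dict build, positive filter and two separate max/min scans into one
-- single-pass fold over the six fixed (name, key) pairs (objective: alternative).

-- ===== PORT A =====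
-- _safe_int(metrics.get(k), 0): values are Int here, so int(v) = v and a missing key gives 0.
def metric_extremes_py (metrics : List (String × Int)) : String × String :=
  let g : String → Int := fun k => (PySem.Dict.mk metrics).getD k 0
  let metric_map : List (String × Int) :=
    [("जीवन स्थिरता", g "life_stability_index"),
     ("निर्णय स्पष्टता", g "confidence_score"),
     ("धर्म संरेखण", g "dharma_alignment_score"),
     ("भावनात्मक संतुलन", g "emotional_regulation_index"),
     ("वित्त अनुशासन", g "financial_discipline_index"),
     ("कर्म दबाव", g "karma_pressure_index")]
  let filtered : List (String × Int) := metric_map.filter (fun p => 0 < p.2)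
  if filtered.isEmpty then ("जीवन स्थिरता", "कर्म दबाव")
  else
    -- max/min over the keys with key=filtered.get: keys are distinct, so this is the
    -- first pair of extremal value; both are some since filtered ≠ [] (guard branch unreachable)
    match PySem.List.max? filtered (fun p => p.2), PySem.List.min? filtered (fun p => p.2) with
    | some s, some w => (s.1, w.1)
    | _, _ => ("जीवन स्थिरता", "कर्म दबाव")

-- ===== PORT B =====
def pvPairs : List (String × String) :=
  [("जीवन स्थिरता", "life_stability_index"),
   ("निर्णय स्पष्टता", "confidence_score"),
   ("धर्म संरेखण", "dharma_alignment_score"),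
   ("भावनात्मक संतुलन", "emotional_regulation_index"),
   ("वित्त अनुशासन", "financial_discipline_index"),
   ("कर्म दबाव", "karma_pressure_index")]

-- one loop step on the already-computed (name, value) pair
def pvStep (st : Option (String × Int) × Option (String × Int)) (nv : String × Int) :
    Option (String × Int) × Option (String × Int) :=
  if nv.2 ≤ 0 then st
  else
    (match st.1 with
     | none => some nv
     | some b => if b.2 < nv.2 then some nv else some b,
     match st.2 with
     | none => some nv
     | some w => if nv.2 < w.2 then some nv else some w)

def metric_extremes_py_alt (metrics : List (String × Int)) : String × String :=
  let st := pvPairs.foldl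
    (fun st p => pvStep st (p.1, (PySem.Dict.mk metrics).getD p.2 0)) (none, none)
  match st.1 with
  | none => ("जीवन स्थिरता", "कर्म दबाव")
  | some b =>
    -- worst is some whenever best is (guard arm unreachable)
    match st.2 with
    | some w => (b.1, w.1)
    | none => ("जीवन स्थिरता", "कर्म दबाव")

-- ===== PRECONDITION & SPEC =====
def Spec_metric_extremes_py (metrics : List (String × Int)) (out : String × String) : Prop := out = metric_extremes_py_alt metrics
instance (metrics : List (String × Int)) (out : String × String) : Decidable (Spec_metric_extremes_py metrics out) := by unfold Spec_metric_extremes_py; infer_instance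

-- ===== CLAIM (what is proved, stated in full; the proofs are below) =====
def Claim_equal_metric_extremes_py : Prop := ∀ (metrics : List (String × Int)), Dom_metric_extremes_py metrics → Spec_metric_extremes_py metrics (metric_extremes_py metrics)

-- ===== LEMMAS AND PROOFS =====

-- the single-pass fold splits into the max-scan and the min-scan over the positive-filtered list
theorem pv_fold_split (l : List (String × Int)) (b w : Option (String × Int)) :
    l.foldl pvStep (b, w) =
      ((l.filter (fun p => 0 < p.2)).foldl
        (fun acc x => match acc with
          | none => some x
          | some m => if m.2 < x.2 then some x else some m) b,
       (l.filter (fun p => 0 < p.2)).foldl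
        (fun acc x => match acc with
          | none => some x
          | some m => if x.2 < m.2 then some x else some m) w) := by
  induction l generalizing b w with
  | nil => simp
  | cons x t ih =>
    by_cases h : 0 < x.2
    · simp [pvStep, not_le.mpr h, h, ih]
    · simp [pvStep, not_lt.mp h, h, ih]

-- A's filter + two scans agree with B's single fold, for an arbitrary (name, value) list
theorem pv_main (m : List (String × Int)) :
    (let filtered := m.filter (fun p => 0 < p.2)
     if filtered.isEmpty then ("जीवन स्थिरता", "कर्म दबाव")
     else
       match PySem.List.max? filtered (fun p => p.2),
             PySem.List.min? filtered (fun p => p.2) with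
       | some s, some w => (s.1, w.1)
       | _, _ => ("जीवन स्थिरता", "कर्म दबाव")) =
    (match (m.foldl pvStep (none, none)).1 with
     | none => ("जीवन स्थिरता", "कर्म दबाव")
     | some b =>
       match (m.foldl pvStep (none, none)).2 with
       | some w => (b.1, w.1)
       | none => ("जीवन स्थिरता", "कर्म दबाव")) := by
  rw [pv_fold_split]
  have e1 : (m.filter (fun p => 0 < p.2)).foldl
      (fun acc x => match acc with
        | none => some x
        | some m => if m.2 < x.2 then some x else some m) none =
      PySem.List.max? (m.filter (fun p => 0 < p.2)) (fun p => p.2) := by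
      unfold PySem.List.max?
      congr 1
      funext acc x
      cases acc <;> rfl
  have e2 : (m.filter (fun p => 0 < p.2)).foldl
      (fun acc x => match acc with
        | none => some x
        | some m => if x.2 < m.2 then some x else some m) none =
      PySem.List.min? (m.filter (fun p => 0 < p.2)) (fun p => p.2) := by
      unfold PySem.List.min?
      congr 1
      funext acc x
      cases acc <;> rfl
  rw [e1, e2]
  by_cases hfl : m.filter (fun p => 0 < p.2) = []
  · simp [hfl, PySem.List.max?, PySem.List.min?]
  · obtain ⟨s, hs⟩ := Option.ne_none_iff_exists'.mp
      (fun hc => hfl ((PySem.List.max?_eq_none_iff (m.filter (fun p => 0 < p.2)) (fun p => p.2)).mp hc))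
    obtain ⟨w, hw⟩ := Option.ne_none_iff_exists'.mp
      (fun hc => hfl ((PySem.List.min?_eq_none_iff (m.filter (fun p => 0 < p.2)) (fun p => p.2)).mp hc))
    simp [hfl, hs, hw, List.isEmpty_iff]

theorem pv_ports_eq (metrics : List (String × Int)) :
    metric_extremes_py metrics = metric_extremes_py_alt metrics := by
  unfold metric_extremes_py metric_extremes_py_alt
  have hmap :
      (pvPairs.foldl
        (fun st p => pvStep st (p.1, (PySem.Dict.mk metrics).getD p.2 0)) (none, none)) =
      ([("जीवन स्थिरता", (PySem.Dict.mk metrics).getD "life_stability_index" 0),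
        ("निर्णय स्पष्टता", (PySem.Dict.mk metrics).getD "confidence_score" 0),
        ("धर्म संरेखण", (PySem.Dict.mk metrics).getD "dharma_alignment_score" 0),
        ("भावनात्मक संतुलन", (PySem.Dict.mk metrics).getD "emotional_regulation_index" 0),
        ("वित्त अनुशासन", (PySem.Dict.mk metrics).getD "financial_discipline_index" 0),
        ("कर्म दबाव", (PySem.Dict.mk metrics).getD "karma_pressure_index" 0)] :
          List (String × Int)).foldl pvStep (none, none) := by
    simp [pvPairs]
  rw [hmap]
  exact pv_main _

-- ===== VERDICT (by name: the statement is the Claim_ definition above) =====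
theorem metric_extremes_py_spec : Claim_equal_metric_extremes_py := by
  intro metrics _
  unfold Spec_metric_extremes_py
  exact pv_ports_eq metrics
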